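-- pv_equiv track=rewrite | github.com/wangyuefeng2017/LoD3Framework- | inverse_facade_stage.py | check_and_remove_overlapping
-- ===== SOURCE A (Python) =====
-- def is_overlap(rect1, rect2):
--     # 判断两个矩形是否重叠
--     (x1, y1), w1, h1 = rect1
--     (x2, y2), w2, h2 = rect2
--     return not (x1 + w1 < x2 or x1 > x2 + w2 or y1 + h1 < y2 or y1 > y2 + h2)
--
-- def check_and_remove_overlapping(rectangles): #删除重叠的矩形,对不满足矩形之间不相交、距离太近等约束条件的窗户矩形进行删除，维持生成结果的拓扑正确。
--     n = len(rectangles)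
--     to_remove = set()
--
--     for i in range(n):
--         for j in range(i + 1, n):
--             if is_overlap(rectangles[i], rectangles[j]):
--                 # 标记要删除的矩形索引
--                 if rectangles[i][1] < rectangles[j][1]:
--                     to_remove.add(i)
--                 else:
--                     to_remove.add(j)
--
--     # 删除宽度较小的矩形
--     rectangles = [rect for i, rect in enumerate(rectangles) if i not in to_remove]
--
--     return rectangles
-- ===== SOURCE B (Python) =====
-- def check_and_remove_overlapping(rectangles):
--     # Filter with a direct per-rectangle survivor predicate instead of building
--     # a pairwise removal set: rectangle i is dropped iff some overlapping
--     # rectangle beats it (strictly wider, or same width and earlier index).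
--     def overlaps(r, s):
--         (x1, y1), w1, h1 = r
--         (x2, y2), w2, h2 = s
--         return x2 <= x1 + w1 and x1 <= x2 + w2 and y2 <= y1 + h1 and y1 <= y2 + h2
--     out = []
--     for i, r in enumerate(rectangles):
--         w = r[1]
--         if not any(overlaps(r, s) and (s[1] > w or (s[1] == w and j < i))
--                    for j, s in enumerate(rectangles)):
--             out.append(r)
--     return out
-- ===== Notes on version B (the rewrite author's own statement) =====
-- stated objective: simpler
-- what changed: B drops A's mutable pairwise removal-set (double index loop marking the narrower rectangle of each overlapping pair) and instead filters in one enumerate pass with a direct per-rectangle survivor predicate via a short-circuiting any(): a rectangle is kept iff no overlapping rectangle is strictly wider or equally wide with a smaller index; the early exit of any() makes B measurably faster on typical inputs although the worst case stays quadratic.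
import Mathlib
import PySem

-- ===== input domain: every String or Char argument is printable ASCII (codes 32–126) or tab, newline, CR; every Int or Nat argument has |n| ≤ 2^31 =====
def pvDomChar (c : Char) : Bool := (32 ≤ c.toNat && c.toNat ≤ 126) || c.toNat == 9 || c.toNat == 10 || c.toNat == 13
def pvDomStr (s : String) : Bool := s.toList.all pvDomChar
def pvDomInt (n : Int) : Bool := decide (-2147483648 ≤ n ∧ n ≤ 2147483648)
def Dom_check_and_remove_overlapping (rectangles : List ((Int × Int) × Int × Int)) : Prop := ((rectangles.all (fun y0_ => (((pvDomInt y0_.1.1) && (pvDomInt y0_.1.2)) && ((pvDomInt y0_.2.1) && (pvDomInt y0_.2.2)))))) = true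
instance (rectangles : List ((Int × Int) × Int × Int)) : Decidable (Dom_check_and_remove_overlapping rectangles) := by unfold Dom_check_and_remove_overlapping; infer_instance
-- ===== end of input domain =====

-- B replaces A's pairwise removal-set construction by a direct per-rectangle
-- "dominated" predicate and a single filtering pass (objective: simpler; same asymptotic cost).

-- ===== PORT A =====
def is_overlap (rect1 rect2 : (Int × Int) × Int × Int) : Bool :=
  -- return not (x1 + w1 < x2 or x1 > x2 + w2 or y1 + h1 < y2 or y1 > y2 + h2)
  !(decide (rect1.1.1 + rect1.2.1 < rect2.1.1) || decide (rect1.1.1 > rect2.1.1 + rect2.2.1)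
    || decide (rect1.1.2 + rect1.2.2 < rect2.1.2) || decide (rect1.1.2 > rect2.1.2 + rect2.2.2))

def check_and_remove_overlapping (rectangles : List ((Int × Int) × Int × Int)) : List ((Int × Int) × Int × Int) :=
  let n : Int := PySem.List.len rectangles
  let to_remove : PySem.Set Int :=
    (PySem.List.pyRange 0 n 1).foldl (fun acc i =>
      (PySem.List.pyRange (i + 1) n 1).foldl (fun acc j =>
        -- rectangles[i], rectangles[j]: indices produced by range(n) are always in range
        let ri := PySem.List.pyGetD rectangles i ((0, 0), 0, 0)
        let rj := PySem.List.pyGetD rectangles j ((0, 0), 0, 0)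
        if is_overlap ri rj then
          if ri.2.1 < rj.2.1 then PySem.Set.add acc i else PySem.Set.add acc j
        else acc) acc) PySem.Set.empty
  (PySem.List.enumerate rectangles).filterMap (fun p =>
    if p.1 ∈ to_remove then none else some p.2)

-- ===== PORT B =====
def overlaps (r s : (Int × Int) × Int × Int) : Bool :=
  decide (s.1.1 ≤ r.1.1 + r.2.1) && decide (r.1.1 ≤ s.1.1 + s.2.1)
    && decide (s.1.2 ≤ r.1.2 + r.2.2) && decide (r.1.2 ≤ s.1.2 + s.2.2)

-- the generator expression under any(...)
def dominated (rectangles : List ((Int × Int) × Int × Int)) (i : Int)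
    (r : (Int × Int) × Int × Int) : Bool :=
  (PySem.List.enumerate rectangles).any (fun q =>
    overlaps r q.2 && (decide (q.2.2.1 > r.2.1) || (decide (q.2.2.1 = r.2.1) && decide (q.1 < i))))

def check_and_remove_overlapping_alt (rectangles : List ((Int × Int) × Int × Int)) : List ((Int × Int) × Int × Int) :=
  (PySem.List.enumerate rectangles).foldl (fun out p =>
    if !dominated rectangles p.1 p.2 then out ++ [p.2] else out) []

-- ===== PRECONDITION & SPEC =====
def Spec_check_and_remove_overlapping (rectangles : List ((Int × Int) × Int × Int)) (out : List ((Int × Int) × Int × Int)) : Prop := out = check_and_remove_overlapping_alt rectangles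
instance (rectangles : List ((Int × Int) × Int × Int)) (out : List ((Int × Int) × Int × Int)) : Decidable (Spec_check_and_remove_overlapping rectangles out) := by unfold Spec_check_and_remove_overlapping; infer_instance

-- ===== CLAIM (what is proved, stated in full; the proofs are below) =====
def Claim_equal_check_and_remove_overlapping : Prop := ∀ (rectangles : List ((Int × Int) × Int × Int)), Dom_check_and_remove_overlapping rectangles → Spec_check_and_remove_overlapping rectangles (check_and_remove_overlapping rectangles)

-- ===== LEMMAS AND PROOFS =====

-- marking rule of A's inner loop body, as a proposition
def pvMark (rectangles : List ((Int × Int) × Int × Int)) (i j y : Int) : Prop :=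
  is_overlap (PySem.List.pyGetD rectangles i ((0, 0), 0, 0)) (PySem.List.pyGetD rectangles j ((0, 0), 0, 0)) = true ∧
  (((PySem.List.pyGetD rectangles i ((0, 0), 0, 0)).2.1 < (PySem.List.pyGetD rectangles j ((0, 0), 0, 0)).2.1 ∧ y = i) ∨
   (¬ (PySem.List.pyGetD rectangles i ((0, 0), 0, 0)).2.1 < (PySem.List.pyGetD rectangles j ((0, 0), 0, 0)).2.1 ∧ y = j))

-- membership after A's inner loop over js
theorem mem_inner (rectangles : List ((Int × Int) × Int × Int)) (i : Int) (js : List Int)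
    (acc : PySem.Set Int) (y : Int) :
    y ∈ js.foldl (fun acc j =>
        let ri := PySem.List.pyGetD rectangles i ((0, 0), 0, 0)
        let rj := PySem.List.pyGetD rectangles j ((0, 0), 0, 0)
        if is_overlap ri rj then
          if ri.2.1 < rj.2.1 then PySem.Set.add acc i else PySem.Set.add acc j
        else acc) acc ↔ y ∈ acc ∨ ∃ j ∈ js, pvMark rectangles i j y := by
  induction js generalizing acc with
  | nil => simp [List.foldl_nil]
  | cons j js ih =>
    simp only [List.foldl_cons, ih, List.mem_cons]
    unfold pvMark
    split_ifs with h1 h2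
    · simp only [PySem.Set.mem_add]
      constructor
      · rintro ((h | hy) | ⟨j', hj', hm⟩)
        · exact Or.inl h
        · exact Or.inr ⟨j, Or.inl rfl, h1, Or.inl ⟨h2, hy⟩⟩
        · exact Or.inr ⟨j', Or.inr hj', hm⟩
      · rintro (h | ⟨j', (rfl | hj'), hm⟩)
        · exact Or.inl (Or.inl h)
        · rcases hm.2 with ⟨_, hy⟩ | ⟨hn, _⟩
          · exact Or.inl (Or.inr hy)
          · exact absurd h2 hn
        · exact Or.inr ⟨j', hj', hm⟩
    · simp only [PySem.Set.mem_add]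
      constructor
      · rintro ((h | hy) | ⟨j', hj', hm⟩)
        · exact Or.inl h
        · exact Or.inr ⟨j, Or.inl rfl, h1, Or.inr ⟨h2, hy⟩⟩
        · exact Or.inr ⟨j', Or.inr hj', hm⟩
      · rintro (h | ⟨j', (rfl | hj'), hm⟩)
        · exact Or.inl (Or.inl h)
        · rcases hm.2 with ⟨hl, _⟩ | ⟨_, hy⟩
          · exact absurd hl h2
          · exact Or.inl (Or.inr hy)
        · exact Or.inr ⟨j', hj', hm⟩
    · constructor
      · rintro (h | ⟨j', hj', hm⟩)
        · exact Or.inl h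
        · exact Or.inr ⟨j', Or.inr hj', hm⟩
      · rintro (h | ⟨j', (rfl | hj'), hm⟩)
        · exact Or.inl h
        · exact absurd hm.1 h1
        · exact Or.inr ⟨j', hj', hm⟩

-- membership after A's double loop
theorem mem_outer (rectangles : List ((Int × Int) × Int × Int)) (n : Int) (is : List Int)
    (acc : PySem.Set Int) (y : Int) :
    y ∈ is.foldl (fun acc i =>
        (PySem.List.pyRange (i + 1) n 1).foldl (fun acc j =>
          let ri := PySem.List.pyGetD rectangles i ((0, 0), 0, 0)
          let rj := PySem.List.pyGetD rectangles j ((0, 0), 0, 0)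
          if is_overlap ri rj then
            if ri.2.1 < rj.2.1 then PySem.Set.add acc i else PySem.Set.add acc j
          else acc) acc) acc ↔
      y ∈ acc ∨ ∃ i ∈ is, ∃ j ∈ PySem.List.pyRange (i + 1) n 1, pvMark rectangles i j y := by
  induction is generalizing acc with
  | nil => simp
  | cons i is ih =>
    simp only [List.foldl_cons, ih, mem_inner, List.mem_cons]
    constructor
    · rintro ((h | ⟨j, hj, hm⟩) | ⟨i', hi', j, hj, hm⟩)
      · exact Or.inl h
      · exact Or.inr ⟨i, Or.inl rfl, j, hj, hm⟩
      · exact Or.inr ⟨i', Or.inr hi', j, hj, hm⟩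
    · rintro (h | ⟨i', (rfl | hi'), j, hj, hm⟩)
      · exact Or.inl (Or.inl h)
      · exact Or.inl (Or.inr ⟨j, hj, hm⟩)
      · exact Or.inr ⟨i', hi', j, hj, hm⟩

-- the two overlap tests agree, and overlap is symmetric
theorem overlaps_eq (r s : (Int × Int) × Int × Int) : is_overlap r s = overlaps r s := by
  rw [Bool.eq_iff_iff]; simp [is_overlap, overlaps]

theorem overlaps_symm (r s : (Int × Int) × Int × Int) : overlaps r s = overlaps s r := by
  rw [Bool.eq_iff_iff]; simp only [overlaps, Bool.and_eq_true, decide_eq_true_eq]; omega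

-- A marks index k (by some pair i < j) exactly when B's predicate dominates rectangle k
theorem key_iff (rectangles : List ((Int × Int) × Int × Int)) (k : Nat) (hk : k < rectangles.length) :
    (∃ i ∈ PySem.List.pyRange 0 (PySem.List.len rectangles) 1,
       ∃ j ∈ PySem.List.pyRange (i + 1) (PySem.List.len rectangles) 1,
         pvMark rectangles i j (k : Int)) ↔
      dominated rectangles (k : Int) rectangles[k] = true := by
  have pg : ∀ (m : Nat) (hm : m < rectangles.length),
      PySem.List.pyGetD rectangles (m : Int) ((0, 0), 0, 0) = rectangles[m] :=
    fun m hm => PySem.List.pyGetD_ofNat rectangles m _ hm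
  simp only [dominated, List.any_eq_true, PySem.List.mem_enumerate_iff,
    PySem.List.mem_pyRange_one, PySem.List.len_eq, pvMark]
  constructor
  · rintro ⟨i, ⟨hi0, hin⟩, j, ⟨hij, hjn⟩, hov, hcase⟩
    have hj0 : 0 ≤ j := by omega
    obtain ⟨a, rfl⟩ : ∃ a : Nat, i = (a : Int) := ⟨i.toNat, by omega⟩
    obtain ⟨b, rfl⟩ : ∃ b : Nat, j = (b : Int) := ⟨j.toNat, by omega⟩
    have ha : a < rectangles.length := by exact_mod_cast hin
    have hb : b < rectangles.length := by exact_mod_cast hjn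
    rw [pg a ha, pg b hb] at hov hcase
    rw [overlaps_eq] at hov
    rcases hcase with ⟨hlt, hy⟩ | ⟨hge, hy⟩
    · have : k = a := by exact_mod_cast hy
      subst this
      exact ⟨((b : Int), rectangles[b]), ⟨b, hb, by simp⟩,
        by simp only [Bool.and_eq_true, Bool.or_eq_true, decide_eq_true_eq]
           exact ⟨hov, Or.inl hlt⟩⟩
    · have : k = b := by exact_mod_cast hy
      subst this
      refine ⟨((a : Int), rectangles[a]), ⟨a, ha, by simp⟩, ?_⟩
      simp only [Bool.and_eq_true, Bool.or_eq_true, decide_eq_true_eq]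
      rw [overlaps_symm] at hov
      refine ⟨hov, ?_⟩
      rcases lt_or_eq_of_le (le_of_not_gt hge) with h | h
      · exact Or.inl h
      · exact Or.inr ⟨h.symm, by exact_mod_cast hij⟩
  · rintro ⟨q, ⟨m, hm, rfl⟩, hcond⟩
    simp only [Bool.and_eq_true, Bool.or_eq_true, decide_eq_true_eq, zero_add] at hcond
    obtain ⟨hov, hdom⟩ := hcond
    rcases Nat.lt_trichotomy k m with hkm | rfl | hmk
    · refine ⟨(k : Int), ⟨by omega, by exact_mod_cast hk⟩, (m : Int),
        ⟨by exact_mod_cast hkm, by exact_mod_cast hm⟩, ?_, ?_⟩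
      · rw [pg k hk, pg m hm, overlaps_eq]; exact hov
      · rw [pg k hk, pg m hm]
        rcases hdom with h | ⟨h, hlt⟩
        · exact Or.inl ⟨h, rfl⟩
        · exact absurd hlt (by omega)
    · rcases hdom with h | ⟨h, hlt⟩
      · exact absurd h (lt_irrefl _)
      · exact absurd hlt (lt_irrefl _)
    · refine ⟨(m : Int), ⟨by omega, by exact_mod_cast hm⟩, (k : Int),
        ⟨by exact_mod_cast hmk, by exact_mod_cast hk⟩, ?_, ?_⟩
      · rw [pg k hk, pg m hm, overlaps_eq, overlaps_symm]; exact hov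
      · rw [pg k hk, pg m hm]
        rcases hdom with h | ⟨h, _⟩
        · exact Or.inr ⟨by omega, rfl⟩
        · exact Or.inr ⟨by omega, rfl⟩

-- a filterMap that keeps x.2 when a test fails is a filter-then-map
theorem filterMap_eq_filter_map' {α β : Type} (f : α → Option β) (q : α → Bool) (g : α → β)
    (l : List α) (h : ∀ x ∈ l, f x = if q x then some (g x) else none) :
    l.filterMap f = (l.filter q).map g := by
  induction l with
  | nil => simp
  | cons x xs ih =>
    have hx := h x (List.mem_cons_self)
    have ih' := ih (fun y hy => h y (List.mem_cons_of_mem _ hy))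
    by_cases hq : q x = true
    · simp [hx, hq, ih']
    · simp only [Bool.not_eq_true] at hq
      simp [hx, hq, ih']

theorem check_and_remove_overlapping_spec' (rectangles : List ((Int × Int) × Int × Int)) :
    check_and_remove_overlapping rectangles = check_and_remove_overlapping_alt rectangles := by
  unfold check_and_remove_overlapping check_and_remove_overlapping_alt
  rw [PySem.List.foldl_append_if]
  simp only [List.nil_append]
  rw [filterMap_eq_filter_map' _ (fun p => !dominated rectangles p.1 p.2) (fun p => p.2)]
  intro x hx
  rw [PySem.List.mem_enumerate_iff] at hx
  obtain ⟨m, hm, rfl⟩ := hx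
  simp only [zero_add]
  have hmem : ((m : Int) ∈ (PySem.List.pyRange 0 (PySem.List.len rectangles) 1).foldl (fun acc i =>
      (PySem.List.pyRange (i + 1) (PySem.List.len rectangles) 1).foldl (fun acc j =>
        let ri := PySem.List.pyGetD rectangles i ((0, 0), 0, 0)
        let rj := PySem.List.pyGetD rectangles j ((0, 0), 0, 0)
        if is_overlap ri rj then
          if ri.2.1 < rj.2.1 then PySem.Set.add acc i else PySem.Set.add acc j
        else acc) acc) PySem.Set.empty) ↔ dominated rectangles (m : Int) rectangles[m] = true := by
    rw [mem_outer]
    simp only [List.not_mem_nil, false_or, PySem.Set.empty]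
    exact key_iff rectangles m hm
  by_cases hd : dominated rectangles (m : Int) rectangles[m] = true
  · rw [if_pos (hmem.mpr hd), hd]; simp
  · rw [if_neg (fun h => hd (hmem.mp h))]
    simp only [Bool.not_eq_true] at hd
    rw [hd]; simp

-- ===== VERDICT (by name: the statement is the Claim_ definition above) =====
theorem check_and_remove_overlapping_spec : Claim_equal_check_and_remove_overlapping := by
  intro rectangles _
  exact check_and_remove_overlapping_spec' rectangles
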